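-- pv_equiv track=rewrite | github.com/qingyun-tuberlin/computer-orientierte-mathematik | alte klausur code task/partialsequence.py | partialsequence
-- ===== SOURCE A (Python) =====
-- def partialsequence(n: int, k: int) -> bool:
--     # 题设：k 为 3 位正整数
--     # “滑动窗口”思想， 就是把“字符串扫描”换成“算术扫描”。
--     if k < 100 or k > 999:
--         raise ValueError("k must be a 3-digit positive integer (100..999).")
--
--     # 当 n 至少还有 3 位时，才能形成一个 3 位窗口
--     while n >= 100:
--         if n % 1000 == k:   # 末尾三位是否等于 k
--             return True
--         n //= 10            # 去掉 n 的最后一位，窗口左移一位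
--     return False
-- ===== SOURCE B (Python) =====
-- def partialsequence(n: int, k: int) -> bool:
--     if k < 100 or k > 999:
--         raise ValueError("k must be a 3-digit positive integer (100..999).")
--     # string-based: k appears as 3 consecutive digits of n iff str(k) is a
--     # substring of str(n); numbers below 100 (incl. negatives) have no 3-digit window
--     return n >= 100 and str(k) in str(n)
-- ===== Notes on version B (the rewrite author's own statement) =====
-- stated objective: idiomatic
-- what changed: Replaced the arithmetic while-loop of modulo-1000 window checks with a single substring test str(k) in str(n) (guarded by n >= 100), computing the decimal string once instead of repeatedly dividing.
import Mathlib
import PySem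

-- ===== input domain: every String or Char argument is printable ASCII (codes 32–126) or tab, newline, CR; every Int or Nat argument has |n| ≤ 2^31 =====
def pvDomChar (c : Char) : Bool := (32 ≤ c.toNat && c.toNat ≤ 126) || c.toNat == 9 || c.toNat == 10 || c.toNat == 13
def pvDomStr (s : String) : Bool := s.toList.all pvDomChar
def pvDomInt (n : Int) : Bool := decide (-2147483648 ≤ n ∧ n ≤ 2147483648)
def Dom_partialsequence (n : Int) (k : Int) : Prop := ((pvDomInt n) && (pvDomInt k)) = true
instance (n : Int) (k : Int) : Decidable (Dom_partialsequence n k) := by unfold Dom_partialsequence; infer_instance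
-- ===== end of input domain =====

-- B replaces A's modulo-1000 sliding-window while-loop with one substring test on the decimal strings (idiomatic; same cost).

-- ===== PORT A =====
-- the 'while n >= 100' loop: check n % 1000 == k, then n //= 10
def partialsequenceLoopA (n : Int) (k : Int) : Bool :=
  if _h : 100 ≤ n then
    if PySem.Int.mod n 1000 = k then true
    else partialsequenceLoopA (PySem.Int.floordiv n 10) k
  else false
termination_by n.toNat
decreasing_by
  rw [PySem.Int.floordiv_eq_ediv_of_pos (by omega)]
  omega

def partialsequence (n : Int) (k : Int) : Bool :=
  if k < 100 ∨ 999 < k then false    -- Python raises ValueError here; excluded by Pre_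
  else partialsequenceLoopA n k

-- ===== PORT B =====
def partialsequence_alt (n : Int) (k : Int) : Bool :=
  if k < 100 ∨ 999 < k then false    -- Python raises ValueError here; excluded by Pre_
  else decide (100 ≤ n) && PySem.Str.isIn (PySem.Int.toStr k) (PySem.Int.toStr n)

-- ===== PRECONDITION & SPEC =====
-- Pre_ excludes exactly the k outside 100..999, where the Python A raises ValueError.
def Pre_partialsequence (n : Int) (k : Int) : Prop := 100 ≤ k ∧ k ≤ 999
instance (n : Int) (k : Int) : Decidable (Pre_partialsequence n k) := by unfold Pre_partialsequence; infer_instance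
def pvWitness_partialsequence : Int × Int := (123456, 345)

def Spec_partialsequence (n : Int) (k : Int) (out : Bool) : Prop := out = partialsequence_alt n k
instance (n : Int) (k : Int) (out : Bool) : Decidable (Spec_partialsequence n k out) := by unfold Spec_partialsequence; infer_instance

-- ===== CLAIM (what is proved, stated in full; the proofs are below) =====
def Claim_equal_partialsequence : Prop := ∀ (n : Int) (k : Int), Dom_partialsequence n k → Pre_partialsequence n k → Spec_partialsequence n k (partialsequence n k)

-- ===== LEMMAS AND PROOFS =====

-- digitChar undone by subtracting 48, on actual digits
theorem pv_digitChar_inv : ∀ x < 10, (Nat.digitChar x).toNat - 48 = x := by decide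

theorem pv_map_digitChar_inv {l : List ℕ} (h : ∀ x ∈ l, x < 10) :
    (l.map Nat.digitChar).map (fun c => c.toNat - 48) = l := by
  induction l with
  | nil => rfl
  | cons a t ih =>
    simp only [List.map_cons, List.cons.injEq]
    exact ⟨pv_digitChar_inv a (h a (by simp)), ih (fun x hx => h x (by simp [hx]))⟩

-- Nat.toDigits is the big-endian digitChar rendering of Nat.digits
theorem pv_toDigitsCore_eq : ∀ (fuel m : ℕ) (l : List Char), 0 < m → m < 10 ^ fuel →
    Nat.toDigitsCore 10 fuel m l = ((Nat.digits 10 m).map Nat.digitChar).reverse ++ l := by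
  intro fuel
  induction fuel with
  | zero => intro m l hm hlt; omega
  | succ f ih =>
    intro m l hm hlt
    rw [Nat.toDigitsCore]
    by_cases h10 : m / 10 = 0
    · rw [if_pos h10, Nat.digits_def' (by omega : (1:ℕ) < 10) hm, h10]
      simp
    · rw [if_neg h10,
        ih (m / 10) ((m % 10).digitChar :: l) (by omega)
          (Nat.div_lt_of_lt_mul (by rw [pow_succ] at hlt; omega)),
        Nat.digits_def' (by omega : (1:ℕ) < 10) hm]
      simp

theorem pv_toDigits_eq (m : ℕ) (hm : 0 < m) :
    Nat.toDigits 10 m = ((Nat.digits 10 m).map Nat.digitChar).reverse := by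
  rw [Nat.toDigits, pv_toDigitsCore_eq (m + 1) m [] hm (by
    have h1 := Nat.lt_two_pow_self (n := m)
    have h2 := Nat.pow_le_pow_left (show 2 ≤ 10 by omega) m
    have h3 := Nat.pow_le_pow_right (show 1 ≤ 10 by omega) (Nat.le_succ m)
    omega)]
  simp

-- toChars of a nonnegative Int
theorem pv_toChars_nonneg (m : ℤ) (hm : 0 < m) :
    PySem.Int.toChars m = ((Nat.digits 10 m.toNat).map Nat.digitChar).reverse := by
  rw [PySem.Int.toChars, if_neg (by omega), pv_toDigits_eq m.toNat (by omega)]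

-- digit-list length bounds
theorem pv_digits_len_le (m : ℕ) (h : m < 100) : (Nat.digits 10 m).length ≤ 2 := by
  rcases Nat.eq_zero_or_pos m with h0 | h0
  · simp [h0]
  · rw [Nat.length_digits 10 m (by omega) (by omega)]
    have : Nat.log 10 m < 2 := Nat.log_lt_of_lt_pow (by omega) (by norm_num; omega)
    omega

theorem pv_digits_len_ge (m : ℕ) (h : 100 ≤ m) : 3 ≤ (Nat.digits 10 m).length := by
  rw [Nat.length_digits 10 m (by omega) (by omega)]
  have : 2 ≤ Nat.log 10 m := Nat.le_log_of_pow_le (by omega) (by norm_num; omega)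
  omega

-- digits of a 3-digit number
theorem pv_digits_k_len (kn : ℕ) (h1 : 100 ≤ kn) (h2 : kn ≤ 999) :
    (Nat.digits 10 kn).length = 3 := by
  rw [Nat.length_digits 10 kn (by omega) (by omega)]
  have hlo : 2 ≤ Nat.log 10 kn := Nat.le_log_of_pow_le (by omega) (by norm_num; omega)
  have hhi : Nat.log 10 kn < 3 := Nat.log_lt_of_lt_pow (by omega) (by norm_num; omega)
  omega

-- the three-digit k is a prefix of digits m  ↔  m % 1000 = k   (for m with ≥ 3 digits)
theorem pv_prefix_iff_mod (m kn : ℕ) (hm : 100 ≤ m) (h1 : 100 ≤ kn) (h2 : kn ≤ 999) :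
    Nat.digits 10 kn <+: Nat.digits 10 m ↔ m % 1000 = kn := by
  have hklen : (Nat.digits 10 kn).length = 3 := pv_digits_k_len kn h1 h2
  have hmlen : 3 ≤ (Nat.digits 10 m).length := pv_digits_len_ge m hm
  have hmod : m % 1000 = Nat.ofDigits 10 ((Nat.digits 10 m).take 3) := by
    have := Nat.self_mod_pow_eq_ofDigits_take (p := 10) 3 m (by omega)
    simpa using this
  constructor
  · intro hpre
    obtain ⟨t, ht⟩ := hpre
    rw [hmod, ← ht, List.take_append_of_le_length (by omega), ← hklen, List.take_length,
      Nat.ofDigits_digits]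
  · intro hmk
    rw [List.prefix_iff_eq_take, hklen]
    have hllen : ((Nat.digits 10 m).take 3).length = 3 := by
      rw [List.length_take]; omega
    obtain ⟨a, b, c, hlabc⟩ : ∃ a b c, (Nat.digits 10 m).take 3 = [a, b, c] := by
      match hl : (Nat.digits 10 m).take 3, hllen with
      | [a, b, c], _ => exact ⟨a, b, c, rfl⟩
    have hlt : ∀ x ∈ [a, b, c], x < 10 := by
      intro x hx
      rw [← hlabc] at hx
      exact Nat.digits_lt_base (by omega) (List.mem_of_mem_take hx)
    rw [hlabc] at hmod
    have hofl : Nat.ofDigits 10 [a, b, c] = kn := by rw [← hmod, hmk]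
    have hc : c ≠ 0 := by
      intro hc0
      rw [hc0] at hofl
      simp [Nat.ofDigits] at hofl
      have ha : a < 10 := hlt a (by simp)
      have hb : b < 10 := hlt b (by simp)
      omega
    have := Nat.digits_ofDigits 10 (by omega) [a, b, c] hlt (by intro _; simpa using hc)
    rw [hofl] at this
    rw [this, hlabc]

-- arithmetic side: the loop finds k  ↔  digits k is an infix of digits m
theorem pv_loopA_iff_infix (kn : ℕ) (h1 : 100 ≤ kn) (h2 : kn ≤ 999) :
    ∀ m : ℕ, (partialsequenceLoopA (m : ℤ) (kn : ℤ) = true ↔ Nat.digits 10 kn <:+: Nat.digits 10 m) := by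
  intro m
  induction m using Nat.strong_induction_on with
  | _ m ih =>
    by_cases hm : 100 ≤ m
    · rw [partialsequenceLoopA, dif_pos (by exact_mod_cast hm)]
      have hmod : PySem.Int.mod (m : ℤ) 1000 = ((m % 1000 : ℕ) : ℤ) := by
        rw [show ((1000 : ℤ)) = ((1000 : ℕ) : ℤ) by norm_num, PySem.Int.mod_natCast]
      have hdiv : PySem.Int.floordiv (m : ℤ) 10 = ((m / 10 : ℕ) : ℤ) := by
        rw [show ((10 : ℤ)) = ((10 : ℕ) : ℤ) by norm_num, PySem.Int.floordiv_natCast]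
      have hdig : Nat.digits 10 m = m % 10 :: Nat.digits 10 (m / 10) :=
        Nat.digits_def' (by omega) (by omega)
      rw [hdig, List.infix_cons_iff, ← hdig]
      by_cases hk : m % 1000 = kn
      · rw [if_pos (by rw [hmod]; exact_mod_cast hk)]
        simp only [true_iff]
        left
        exact (pv_prefix_iff_mod m kn hm h1 h2).mpr hk
      · rw [if_neg (by rw [hmod]; intro hc; exact hk (by exact_mod_cast hc))]
        rw [hdiv, ih (m / 10) (by omega)]
        constructor
        · intro h; exact Or.inr h
        · rintro (hpre | hinf)
          · exact absurd ((pv_prefix_iff_mod m kn hm h1 h2).mp hpre) hk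
          · exact hinf
    · rw [partialsequenceLoopA, dif_neg (by exact_mod_cast hm)]
      simp only [Bool.false_eq_true, false_iff]
      intro hinf
      have := List.IsInfix.length_le hinf
      have hk3 : (Nat.digits 10 kn).length = 3 := pv_digits_k_len kn h1 h2
      have hm2 : (Nat.digits 10 m).length ≤ 2 := pv_digits_len_le m (by omega)
      omega

-- string side: str(k) in str(n)  ↔  digits k is an infix of digits n   (for 100 ≤ n)
theorem pv_isIn_iff_infix (n : ℤ) (kn : ℕ) (hn : 100 ≤ n) (h1 : 100 ≤ kn) (h2 : kn ≤ 999) :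
    PySem.Str.isIn (PySem.Int.toStr (kn : ℤ)) (PySem.Int.toStr n) = true ↔
      Nat.digits 10 kn <:+: Nat.digits 10 n.toNat := by
  rw [PySem.Str.isIn_iff_infix, PySem.Int.toList_toStr, PySem.Int.toList_toStr,
      pv_toChars_nonneg _ (by omega), pv_toChars_nonneg n (by omega)]
  simp only [Int.toNat_natCast]
  rw [List.reverse_infix]
  constructor
  · intro h
    have h' := List.IsInfix.map (fun c => c.toNat - 48) h
    rwa [pv_map_digitChar_inv (fun x hx => Nat.digits_lt_base (by omega) hx),
         pv_map_digitChar_inv (fun x hx => Nat.digits_lt_base (by omega) hx)] at h'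
  · exact fun h => List.IsInfix.map Nat.digitChar h

-- ===== VERDICT (by name: the statement is the Claim_ definition above) =====
theorem partialsequence_spec : Claim_equal_partialsequence := by
  intro n k _ hpre
  obtain ⟨hk1, hk2⟩ := hpre
  unfold Spec_partialsequence partialsequence partialsequence_alt
  rw [if_neg (by omega), if_neg (by omega)]
  by_cases hn : 100 ≤ n
  · have hkn : k = ((k.toNat : ℕ) : ℤ) := by omega
    have hnn : n = ((n.toNat : ℕ) : ℤ) := by omega
    rw [decide_eq_true (by omega : 100 ≤ n), Bool.true_and]
    have harith := pv_loopA_iff_infix k.toNat (by omega) (by omega) n.toNat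
    have hstr := pv_isIn_iff_infix n k.toNat hn (by omega) (by omega)
    rw [← hkn] at harith hstr
    rw [← hnn] at harith
    by_cases hres : partialsequenceLoopA n k = true
    · rw [hres, Eq.comm, hstr, ← harith, hres]
    · rw [Bool.not_eq_true] at hres
      rw [hres, Eq.comm]
      rw [Bool.eq_false_iff]
      intro hc
      rw [hstr, ← harith] at hc
      rw [hc] at hres
      simp at hres
  · rw [partialsequenceLoopA, dif_neg hn, decide_eq_false (by omega), Bool.false_and]
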